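-- pv_equiv track=rewrite | github.com/RuslanYamandi/Hillel | HW19/main.py | get_max_deep
-- ===== SOURCE A (Python) =====
-- def get_max_deep(nums: list) -> int:
--     length = len(nums)
--     top = None
--     bottom = None
--     deep = 0
--
--     for i in range(length):
--         val = nums[i]
--         if i == 0:
--             top = val
--             continue
--         if i == length - 1:
--             continue
--         if val > top:
--             top = val
--             bottom = None
--         elif val < top:
--             if bottom is None:
--                 bottom = val
--             elif val < bottom:
--                 bottom = val
--         if top is not None and bottom is not None:
--             diff = top - bottom
--             if diff > deep:
--                 deep = diff
--     return deep
-- ===== SOURCE B (Python) =====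
-- def get_max_deep(nums: list) -> int:
--     # Two-pass: prefix-maximum table, then best dip over the middle slice.
--     if len(nums) < 3:
--         return 0
--     pref = []
--     m = nums[0]
--     for v in nums:
--         m = max(m, v)
--         pref.append(m)
--     best = 0
--     for p, v in zip(pref[1:-1], nums[1:-1]):
--         if p - v > best:
--             best = p - v
--     return best
-- ===== Notes on version B (the rewrite author's own statement) =====
-- stated objective: alternative
-- what changed: A's single stateful pass with a resettable `bottom` tracker is replaced by building a prefix-maximum table and then scanning the middle slice, taking the best prefix_max[i]-nums[i] floored at 0.
import Mathlib
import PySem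

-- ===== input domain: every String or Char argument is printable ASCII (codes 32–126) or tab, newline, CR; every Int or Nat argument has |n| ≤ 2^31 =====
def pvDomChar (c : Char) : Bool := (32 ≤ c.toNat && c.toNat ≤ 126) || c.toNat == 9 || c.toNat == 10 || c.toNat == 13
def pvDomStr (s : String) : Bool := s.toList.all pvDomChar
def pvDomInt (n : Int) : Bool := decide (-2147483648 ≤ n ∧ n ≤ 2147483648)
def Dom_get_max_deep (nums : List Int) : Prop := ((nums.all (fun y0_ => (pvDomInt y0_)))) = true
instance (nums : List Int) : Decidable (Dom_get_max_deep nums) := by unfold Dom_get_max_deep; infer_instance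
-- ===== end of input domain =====

-- B replaces A's single stateful pass (with its resettable `bottom`) by a prefix-maximum table
-- plus a zip pass over the middle slice; objective: alternative decomposition, same cost.

-- ===== PORT A =====
-- loop body of A for a middle index (i ≠ 0, i ≠ length-1); in Python `top` is always an int
-- there (set at i = 0), so `Option.any` encodes `val > top` / `val < top` exactly.
def stepA (s : Option Int × Option Int × Int) (val : Int) : Option Int × Option Int × Int :=
  let top := s.1
  let bottom := s.2.1
  let deep := s.2.2
  let tb : Option Int × Option Int :=
    if top.any (fun t => val > t) then (some val, none)
    else if top.any (fun t => val < t) then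
      (top, match bottom with
            | none => some val
            | some b => if val < b then some val else some b)
    else (top, bottom)
  match tb with
  | (some t, some b) => if t - b > deep then (some t, some b, t - b) else (some t, some b, deep)
  | (t?, b?) => (t?, b?, deep)

def get_max_deep (nums : List Int) : Int :=
  let length : Int := nums.length
  let st := (PySem.List.pyRange 0 length 1).foldl
    (fun (s : Option Int × Option Int × Int) i =>
      let val := PySem.List.pyGetD nums i 0   -- nums[i]; i is in range, so exact
      if i = 0 then (some val, s.2.1, s.2.2)
      else if i = length - 1 then s
      else stepA s val)
    ((none : Option Int), (none : Option Int), (0 : Int))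
  st.2.2

-- ===== PORT B =====
def get_max_deep_alt (nums : List Int) : Int :=
  if (nums.length : Int) < 3 then 0
  else
    let pref := (nums.foldl
      (fun (acc : List Int × Int) v =>
        let m := max acc.2 v
        (acc.1 ++ [m], m))
      (([] : List Int), PySem.List.pyGetD nums 0 0)).1
    (List.zip (PySem.List.slice pref (some 1) (some (-1)))
              (PySem.List.slice nums (some 1) (some (-1)))).foldl
      (fun best pv => if pv.1 - pv.2 > best then pv.1 - pv.2 else best) 0

-- ===== PRECONDITION & SPEC =====
def Spec_get_max_deep (nums : List Int) (out : Int) : Prop := out = get_max_deep_alt nums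
instance (nums : List Int) (out : Int) : Decidable (Spec_get_max_deep nums out) := by unfold Spec_get_max_deep; infer_instance

-- ===== CLAIM (what is proved, stated in full; the proofs are below) =====
def Claim_equal_get_max_deep : Prop := ∀ (nums : List Int), Dom_get_max_deep nums → Spec_get_max_deep nums (get_max_deep nums)

-- ===== LEMMAS AND PROOFS =====

-- running prefix maxima of l, after an already-seen maximum m
def prefFun (m : Int) : List Int → List Int
  | [] => []
  | v :: t => max m v :: prefFun (max m v) t

theorem prefAcc_spec (l : List Int) (acc : List Int) (m : Int) :
    (l.foldl (fun (a : List Int × Int) v => (a.1 ++ [max a.2 v], max a.2 v)) (acc, m)).1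
      = acc ++ prefFun m l := by
  induction l generalizing acc m with
  | nil => simp [prefFun]
  | cons v t ih => simp [List.foldl_cons, prefFun, ih]

theorem prefFun_length (m : Int) (l : List Int) : (prefFun m l).length = l.length := by
  induction l generalizing m with
  | nil => rfl
  | cons v t ih => simp [prefFun, ih]

theorem prefFun_dropLast (m : Int) (l : List Int) :
    (prefFun m l).dropLast = prefFun m l.dropLast := by
  induction l generalizing m with
  | nil => rfl
  | cons v t ih =>
    cases t with
    | nil => rfl
    | cons w u =>
      have h1 : (v :: w :: u).dropLast = v :: (w :: u).dropLast := by simp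
      rw [h1]
      show (max m v :: prefFun (max m v) (w :: u)).dropLast
            = max m v :: prefFun (max m v) ((w :: u).dropLast)
      rw [List.dropLast_cons_of_ne_nil
            (by show max (max m v) w :: prefFun (max (max m v) w) u ≠ []; simp), ih]

-- xs[1:-1] for lists of length ≥ 3
theorem slice_one_neg_one (xs : List Int) (h : 3 ≤ xs.length) :
    PySem.List.slice xs (some 1) (some (-1)) = (xs.drop 1).dropLast := by
  simp [PySem.List.slice, PySem.List.clampIdx]
  have hne : xs ≠ [] := by intro h'; subst h'; simp at h
  rw [if_neg hne]
  have h1 : min 1 xs.length = 1 := by omega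
  rw [h1, List.dropLast_eq_take]
  congr 1
  · simp; omega
  · simp [List.drop_one]

theorem stepA_gt {m v : Int} (bo : Option Int) (d : Int) (h : v > m) :
    stepA (some m, bo, d) v = (some v, none, d) := by
  simp [stepA, h]

theorem stepA_lt_none {m v : Int} (d : Int) (h : v < m) :
    stepA (some m, none, d) v = (some m, some v, if m - v > d then m - v else d) := by
  have h2 : ¬ v > m := by omega
  simp [stepA, h, h2]
  split <;> simp_all

theorem stepA_lt_some_lt {m v b0 : Int} (d : Int) (h : v < m) (hvb : v < b0) :
    stepA (some m, some b0, d) v = (some m, some v, if m - v > d then m - v else d) := by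
  have h2 : ¬ v > m := by omega
  simp [stepA, h, h2, hvb]
  split <;> simp_all

theorem stepA_lt_some_ge {m v b0 : Int} (d : Int) (h : v < m) (hvb : ¬ v < b0) :
    stepA (some m, some b0, d) v = (some m, some b0, if m - b0 > d then m - b0 else d) := by
  have h2 : ¬ v > m := by omega
  simp [stepA, h, h2, hvb]
  split <;> simp_all

theorem stepA_eq_none {m v : Int} (d : Int) (h : ¬ v > m) (h2 : ¬ v < m) :
    stepA (some m, none, d) v = (some m, none, d) := by
  simp [stepA, h, h2]

theorem stepA_eq_some {m v b0 : Int} (d : Int) (h : ¬ v > m) (h2 : ¬ v < m) :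
    stepA (some m, some b0, d) v = (some m, some b0, if m - b0 > d then m - b0 else d) := by
  simp [stepA, h, h2]
  split <;> simp_all

-- the core invariant: A's stateful middle pass equals B's zip pass over prefix maxima
theorem core (mid : List Int) (m : Int) (bottom : Option Int) (deep best : Int)
    (hdb : deep = best) (hb : 0 ≤ best)
    (hbot : ∀ b, bottom = some b → m - b ≤ deep) :
    (mid.foldl stepA (some m, bottom, deep)).2.2
      = ((prefFun m mid).zip mid).foldl
          (fun best pv => if pv.1 - pv.2 > best then pv.1 - pv.2 else best) best := by
  induction mid generalizing m bottom deep best with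
  | nil => simpa [prefFun] using hdb
  | cons v t ih =>
    simp only [prefFun, List.zip_cons_cons, List.foldl_cons]
    by_cases hgt : v > m
    · have hm : max m v = v := by omega
      rw [stepA_gt bottom deep hgt, hm]
      have hbest : (if v - v > best then v - v else best) = best := by split <;> omega
      rw [hbest]
      exact ih v none deep best hdb hb (fun b hb' => by cases hb')
    · have hm : max m v = m := by omega
      rw [hm]
      by_cases hlt : v < m
      · cases bottom with
        | none =>
          rw [stepA_lt_none deep hlt, hdb]
          exact ih m (some v) _ _ rfl (by split <;> omega)
            (fun b hb' => by injection hb' with h'; subst h'; split <;> omega)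
        | some b0 =>
          by_cases hvb : v < b0
          · rw [stepA_lt_some_lt deep hlt hvb, hdb]
            exact ih m (some v) _ _ rfl (by split <;> omega)
              (fun b hb' => by injection hb' with h'; subst h'; split <;> omega)
          · have hle := hbot b0 rfl
            rw [stepA_lt_some_ge deep hlt hvb]
            have h1 : (if m - b0 > deep then m - b0 else deep) = deep := by split <;> omega
            have h2 : (if m - v > best then m - v else best) = best := by split <;> omega
            rw [h1, h2]
            exact ih m (some b0) deep best hdb hb
              (fun b hb' => by injection hb' with h'; subst h'; exact hle)
      · have hveq : (if m - v > best then m - v else best) = best := by split <;> omega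
        rw [hveq]
        cases bottom with
        | none =>
          rw [stepA_eq_none deep hgt hlt]
          exact ih m none deep best hdb hb (fun b hb' => by cases hb')
        | some b0 =>
          have hle := hbot b0 rfl
          rw [stepA_eq_some deep hgt hlt]
          have h1 : (if m - b0 > deep then m - b0 else deep) = deep := by split <;> omega
          rw [h1]
          exact ih m (some b0) deep best hdb hb
            (fun b hb' => by injection hb' with h'; subst h'; exact hle)

-- A on a list of length ≥ 3 is the stepA-fold over the middle elements
theorem A_char (x : Int) (rest : List Int) (h : 3 ≤ (x :: rest).length) :
    get_max_deep (x :: rest)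
      = ((rest.dropLast).foldl stepA (some x, none, 0)).2.2 := by
  simp only [get_max_deep]
  set nums := x :: rest with hnums
  set L : Int := (nums.length : Int) with hLdef
  have hL3 : 3 ≤ L := by rw [hLdef]; exact_mod_cast h
  have r0 : PySem.List.pyRange 0 L 1 = 0 :: PySem.List.pyRange 1 L 1 :=
    PySem.List.pyRange_one_cons (by omega)
  have r1 : PySem.List.pyRange 1 L 1 = PySem.List.pyRange 1 (L - 1) 1 ++ [L - 1] := by
    have := PySem.List.pyRange_one_succ_right (a := 1) (b := L - 1) (by omega)
    simpa using this
  rw [r0, r1, List.foldl_cons, List.foldl_append, List.foldl_cons, List.foldl_nil]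
  have hne : ¬ ((L - 1 : Int) = 0) := by omega
  -- the i = 0 step seeds top with nums[0] = x; the last step (i = L-1) is the identity
  simp only [if_neg hne, hnums, PySem.List.pyGetD_zero_cons, reduceIte]
  -- the middle: indices 1,…,L-2 read nums.dropLast and run stepA
  have congr1 : (PySem.List.pyRange 1 (L - 1) 1).foldl
      (fun (s : Option Int × Option Int × Int) (i : Int) =>
        if i = 0 then ((some (PySem.List.pyGetD (x :: rest) i 0) : Option Int), s.2.1, s.2.2)
        else if i = L - 1 then s
        else stepA s (PySem.List.pyGetD (x :: rest) i 0)) (some x, none, 0)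
      = (PySem.List.pyRange 1 (L - 1) 1).foldl
        (fun (s : Option Int × Option Int × Int) (i : Int) =>
          stepA s (PySem.List.pyGetD (x :: rest).dropLast i 0)) (some x, none, 0) := by
    apply PySem.List.foldl_congr_mem
    intro acc i hi
    rw [PySem.List.mem_pyRange_one] at hi
    have hi0 : ¬ (i = 0) := by omega
    have hil : ¬ (i = L - 1) := by omega
    simp only [hi0, if_false, hil]
    have hlen2 : L = ((x :: rest).length : Int) := by rw [hLdef, hnums]
    have hv : PySem.List.pyGetD (x :: rest) i 0 = PySem.List.pyGetD (x :: rest).dropLast i 0 := by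
      rw [PySem.List.pyGetD_eq_getElem (xs := x :: rest) (i := i) (d := 0)
            (by omega) (by omega),
          PySem.List.pyGetD_eq_getElem (xs := (x :: rest).dropLast) (i := i) (d := 0)
            (by omega) (by simp only [List.length_dropLast]; omega),
          List.getElem_dropLast]
    rw [hv]
  rw [congr1]
  have hlen2 : L = ((x :: rest).length : Int) := by rw [hLdef, hnums]
  have hdl : L - 1 = (((x :: rest).dropLast).length : Int) := by
    simp only [List.length_dropLast]
    push_cast at hlen2 ⊢
    omega
  rw [hdl]
  rw [PySem.List.foldl_pyRange_pyGetD' ((x :: rest).dropLast) (0 : Int) stepA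
        ((some x : Option Int), (none : Option Int), (0:Int)) (a := 1) (by omega)]
  have hfin : List.drop (Int.toNat 1) ((x :: rest).dropLast) = rest.dropLast := by
    cases rest with
    | nil => simp [hnums] at h
    | cons y t => simp
  rw [hfin]

-- B on a list of length ≥ 3 is the zip-fold over prefix maxima of the middle elements
theorem B_char (x : Int) (rest : List Int) (h : 3 ≤ (x :: rest).length) :
    get_max_deep_alt (x :: rest)
      = ((prefFun x rest.dropLast).zip rest.dropLast).foldl
          (fun best pv => if pv.1 - pv.2 > best then pv.1 - pv.2 else best) 0 := by
  have hL : ¬ (((x :: rest).length : Int) < 3) := by omega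
  rw [get_max_deep_alt, if_neg hL]
  have hpref : ((x :: rest).foldl
      (fun (a : List Int × Int) v => (a.1 ++ [max a.2 v], max a.2 v))
      (([] : List Int), PySem.List.pyGetD (x :: rest) 0 0)).1 = x :: prefFun x rest := by
    rw [PySem.List.pyGetD_zero_cons, prefAcc_spec, prefFun]
    simp
  simp only [hpref]
  rw [slice_one_neg_one _ (by rw [List.length_cons, prefFun_length]; simpa using h),
      slice_one_neg_one _ h]
  simp only [List.drop_one, List.tail_cons]
  rw [prefFun_dropLast]

theorem small_eq (nums : List Int) (h : nums.length < 3) :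
    get_max_deep nums = get_max_deep_alt nums := by
  have hB : get_max_deep_alt nums = 0 := by
    rw [get_max_deep_alt, if_pos (by exact_mod_cast Int.ofNat_lt.mpr h)]
  rw [hB]
  interval_cases hl : nums.length
  · simp [get_max_deep, PySem.List.pyRange_one_eq_nil, hl]
  · simp [get_max_deep, hl]
    rw [PySem.List.pyRange_one_cons (by omega), PySem.List.pyRange_one_eq_nil (by omega)]
    simp
  · simp [get_max_deep, hl]
    rw [PySem.List.pyRange_one_cons (by omega), PySem.List.pyRange_one_cons (by omega),
        PySem.List.pyRange_one_eq_nil (by omega)]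
    norm_num

-- ===== VERDICT (by name: the statement is the Claim_ definition above) =====
theorem get_max_deep_spec : Claim_equal_get_max_deep := by
  intro nums _
  unfold Spec_get_max_deep
  by_cases h : nums.length < 3
  · exact small_eq nums h
  · push Not at h
    cases nums with
    | nil => simp at h
    | cons x rest =>
      rw [A_char x rest h, B_char x rest h]
      exact core _ x none 0 0 rfl le_rfl (fun b hb => by cases hb)
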